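-- pv_equiv track=rewrite | github.com/chenrookie96/GCI-DRL-TSBC | drl_tsbc.py | balance_timetable
-- ===== SOURCE A (Python) =====
-- from typing import Tuple, List, Dict, Any
--
-- def balance_timetable(up_departures: List[int], down_departures: List[int],
--                      service_end: int, t_max: int = 20) -> Tuple[List[int], List[int]]:
--     """
--     严格按照论文算法2.2实现的后处理算法
--
--     论文算法2.2步骤8-13：
--     1. 选择发车次数更多的方向
--     2. 从时刻表中删除该方向的倒数第二次发车
--     3. k ← 此时该方向的总发车次数
--     4. WHILE 第k次和第k-1次发车间隔 > T_max:
--     5.   将第k-1次发车时间推迟，使其与第k次间隔为T_max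
--     6.   k = k - 1
--
--     Args:
--         up_departures: 上行发车时间列表
--         down_departures: 下行发车时间列表
--         service_end: 服务结束时间
--         t_max: 最大发车间隔（默认20分钟）
--
--     Returns:
--         调整后的(上行发车时间, 下行发车时间)
--     """
--     up_count = len(up_departures)
--     down_count = len(down_departures)
--
--     # 如果发车次数相等，直接返回
--     if up_count == down_count:
--         return sorted(up_departures), sorted(down_departures)
--
--     # 步骤1: 选择发车次数更多的方向
--     if up_count > down_count:
--         more_deps = sorted(up_departures.copy())
--         less_deps = sorted(down_departures.copy())
--         is_up_more = True
--     else: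
--         more_deps = sorted(down_departures.copy())
--         less_deps = sorted(up_departures.copy())
--         is_up_more = False
--
--     # 步骤2-6: 重复删除倒数第二次发车，直到发车次数相等
--     while len(more_deps) > len(less_deps):
--         if len(more_deps) >= 2:
--             # 删除倒数第二次发车
--             more_deps.pop(-2)
--
--             # 向前调整发车时刻
--             k = len(more_deps) - 1  # 最后一次发车的索引
--
--             while k > 0:
--                 # 计算第k次和第k-1次发车的间隔
--                 interval = more_deps[k] - more_deps[k-1]
--
--                 if interval > t_max:
--                     # 将第k-1次发车时间推迟，使其与第k次间隔为t_max
--                     more_deps[k-1] = more_deps[k] - t_max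
--                     k -= 1
--                 else:
--                     # 间隔不超过t_max，停止调整
--                     break
--         else:
--             # 只剩一次发车，无法再删除
--             break
--
--     # 返回调整后的时刻表
--     if is_up_more:
--         return more_deps, less_deps
--     else:
--         return less_deps, more_deps
-- ===== SOURCE B (Python) =====
-- def balance_timetable(up_departures, down_departures, service_end, t_max=20):
--     up = sorted(up_departures)
--     down = sorted(down_departures)
--     if len(up) == len(down):
--         return up, down
--     more, less = (up, down) if len(up) > len(down) else (down, up)
--     target = max(len(less), 1)
--     # keep the first target-1 departures plus the very last one
--     kept = more[:target - 1] + more[-1:]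
--     # single backward pass enforcing the max headway, stop at first OK gap
--     for k in range(len(kept) - 1, 0, -1):
--         if kept[k] - kept[k - 1] > t_max:
--             kept[k - 1] = kept[k] - t_max
--         else:
--             break
--     if len(up) > len(down):
--         return kept, less
--     return less, kept
-- ===== Notes on version B (the rewrite author's own statement) =====
-- stated objective: alternative
-- what changed: Instead of repeatedly popping the second-to-last departure and re-running the backward adjustment pass after every pop, B keeps the first target-1 sorted departures plus the last one in a single slice and runs the backward t_max-enforcing pass exactly once.
-- outside the precondition, e.g. on balance_timetable([9, 0, 7, 4], [3, 9], 0, -3): A returns ([15, 9], [3, 9]), B returns ([12, 9], [3, 9])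
import Mathlib
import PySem

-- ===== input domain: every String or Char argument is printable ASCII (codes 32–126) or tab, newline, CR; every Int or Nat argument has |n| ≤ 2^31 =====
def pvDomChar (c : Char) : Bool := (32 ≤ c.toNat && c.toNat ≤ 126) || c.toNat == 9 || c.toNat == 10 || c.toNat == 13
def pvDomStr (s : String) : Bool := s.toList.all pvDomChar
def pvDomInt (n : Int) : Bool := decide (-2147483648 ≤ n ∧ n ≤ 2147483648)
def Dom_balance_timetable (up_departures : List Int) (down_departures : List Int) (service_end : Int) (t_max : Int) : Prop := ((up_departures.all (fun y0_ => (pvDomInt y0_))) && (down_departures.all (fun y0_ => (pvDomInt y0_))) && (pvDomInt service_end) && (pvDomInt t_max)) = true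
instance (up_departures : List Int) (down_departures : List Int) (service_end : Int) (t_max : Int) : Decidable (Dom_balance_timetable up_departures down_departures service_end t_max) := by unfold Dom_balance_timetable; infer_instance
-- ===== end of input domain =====

-- B replaces A's repeated pop-then-readjust loop by one slice plus a single backward
-- t_max-enforcing pass (objective: alternative; equal on the return value for t_max ≥ 0).

-- ===== PORT A =====
-- Both Pythons walk their list from the END (k = len-1 downwards, break on the first
-- small gap), so the inner while loop is ported as the obvious structural recursion
-- over the REVERSED list: prev is more_deps[k], the list argument is the part left of k.
def adjRev (t_max : Int) (prev : Int) : List Int → List Int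
  | [] => []
  | x :: xs => if prev - x > t_max then (prev - t_max) :: adjRev t_max (prev - t_max) xs else x :: xs

-- more_deps.pop(-2) on the reversed list: drop the element at reversed index 1
def popR : List Int → List Int
  | [] => []
  | [a] => [a]
  | a :: _ :: t => a :: t

@[simp] theorem adjRev_length (t_max prev : Int) (l : List Int) :
    (adjRev t_max prev l).length = l.length := by
  induction l generalizing prev with
  | nil => simp [adjRev]
  | cons x xs ih => simp only [adjRev]; split <;> simp [ih]

-- A's outer while loop (working on the reversed surplus-direction list)
def loopR (t_max : Int) (lessLen : Nat) (r : List Int) : List Int :=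
  if lessLen < r.length then
    if 2 ≤ r.length then
      loopR t_max lessLen (match popR r with
        | [] => []
        | h :: t => h :: adjRev t_max h t)
    else r
  else r
  termination_by r.length
  decreasing_by
    cases r with
    | nil => simp at *
    | cons a t =>
      cases t with
      | nil => simp at *
      | cons b t' => simp [popR, adjRev_length]

def balance_timetable (up_departures : List Int) (down_departures : List Int) (service_end : Int) (t_max : Int) : List Int × List Int :=
  let up_count := up_departures.length
  let down_count := down_departures.length
  if up_count = down_count then
    (PySem.List.sorted up_departures (fun x => x) false, PySem.List.sorted down_departures (fun x => x) false)
  else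
    let more_deps := if up_count > down_count then PySem.List.sorted up_departures (fun x => x) false
                     else PySem.List.sorted down_departures (fun x => x) false
    let less_deps := if up_count > down_count then PySem.List.sorted down_departures (fun x => x) false
                     else PySem.List.sorted up_departures (fun x => x) false
    let res := (loopR t_max less_deps.length more_deps.reverse).reverse
    if up_count > down_count then (res, less_deps) else (less_deps, res)

-- ===== PORT B =====
def balance_timetable_alt (up_departures : List Int) (down_departures : List Int) (service_end : Int) (t_max : Int) : List Int × List Int :=
  let up := PySem.List.sorted up_departures (fun x => x) false
  let down := PySem.List.sorted down_departures (fun x => x) false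
  if up.length = down.length then (up, down)
  else
    let more := if up.length > down.length then up else down
    let less := if up.length > down.length then down else up
    let target := max less.length 1
    -- kept = more[:target-1] + more[-1:]
    let kept := more.take (target - 1) ++ more.drop (more.length - 1)
    -- the single backward pass with break, again over the reversed list
    let res := (match kept.reverse with
      | [] => []
      | h :: t => (h :: adjRev t_max h t).reverse)
    if up.length > down.length then (res, less) else (less, res)

-- ===== PRECONDITION & SPEC =====
-- Pre_ excludes negative t_max: a negative maximum headway is outside the natural
-- domain of the algorithm, and there A's interleaving of partial adjustment passes
-- with the pops yields accidental values (see claim cites) B does not reproduce.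
def Pre_balance_timetable (up_departures : List Int) (down_departures : List Int) (service_end : Int) (t_max : Int) : Prop := 0 ≤ t_max
instance (up_departures : List Int) (down_departures : List Int) (service_end : Int) (t_max : Int) : Decidable (Pre_balance_timetable up_departures down_departures service_end t_max) := by unfold Pre_balance_timetable; infer_instance

def pvWitness_balance_timetable : List Int × List Int × Int × Int := ([3, 50, 7, 28], [10, 40], 60, 20)

def Spec_balance_timetable (up_departures : List Int) (down_departures : List Int) (service_end : Int) (t_max : Int) (out : List Int × List Int) : Prop := out = balance_timetable_alt up_departures down_departures service_end t_max
instance (up_departures : List Int) (down_departures : List Int) (service_end : Int) (t_max : Int) (out : List Int × List Int) : Decidable (Spec_balance_timetable up_departures down_departures service_end t_max out) := by unfold Spec_balance_timetable; infer_instance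

-- ===== CLAIM (what is proved, stated in full; the proofs are below) =====
def Claim_equal_balance_timetable : Prop := ∀ (up_departures : List Int) (down_departures : List Int) (service_end : Int) (t_max : Int), Dom_balance_timetable up_departures down_departures service_end t_max → Pre_balance_timetable up_departures down_departures service_end t_max → Spec_balance_timetable up_departures down_departures service_end t_max (balance_timetable up_departures down_departures service_end t_max)

-- ===== LEMMAS AND PROOFS =====

-- composing two backward passes: the second one subsumes the first
theorem adjRev_adjRev (t_max : Int) (xs : List Int) :
    ∀ a b : Int, b ≤ a → adjRev t_max a (adjRev t_max b xs) = adjRev t_max a xs := by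
  induction xs with
  | nil => intro a b _; simp [adjRev]
  | cons y ys ih =>
    intro a b hba
    by_cases hb : b - y > t_max
    · simp only [adjRev, if_pos hb]
      rcases eq_or_lt_of_le hba with h | h
      · subst h; simp [hb]
      · have ha : a - (b - t_max) > t_max := by omega
        have ha' : a - y > t_max := by omega
        simp only [if_pos ha, if_pos ha']
        exact congrArg _ (ih _ _ (by omega))
    · simp [adjRev, hb]

-- the same modulo dropping a prefix of the adjusted part
theorem adjRev_drop_adjRev (t_max : Int) (ht : 0 ≤ t_max) (xs : List Int) :
    ∀ (j : Nat) (a b : Int), b ≤ a →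
      adjRev t_max a ((adjRev t_max b xs).drop j) = adjRev t_max a (xs.drop j) := by
  induction xs with
  | nil => intro j a b _; simp [adjRev]
  | cons y ys ih =>
    intro j a b hba
    cases j with
    | zero => simpa using adjRev_adjRev t_max (y :: ys) a b hba
    | succ j =>
      by_cases hb : b - y > t_max
      · simp only [adjRev, if_pos hb, List.drop_succ_cons]
        exact ih j a (b - t_max) (by omega)
      · simp [adjRev, hb]

@[simp] theorem popR_length (r : List Int) (h : 2 ≤ r.length) :
    (popR r).length = r.length - 1 := by
  match r with
  | a :: b :: t => simp [popR]

-- what B keeps, on the reversed list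
def trimR (lessLen : Nat) : List Int → List Int
  | [] => []
  | h :: t => h :: t.drop (t.length - (max lessLen 1 - 1))

@[simp] theorem trimR_length_cons (lessLen : Nat) (h : Int) (t : List Int) :
    (trimR lessLen (h :: t)).length = t.length - (t.length - (max lessLen 1 - 1)) + 1 := by
  simp [trimR]

-- the heart: A's loop equals one trim followed by one backward pass
theorem loopR_eq_adj_trimR (t_max : Int) (ht : 0 ≤ t_max) (lessLen : Nat) :
    ∀ (r : List Int), lessLen < r.length →
      loopR t_max lessLen r =
        (match trimR lessLen r with
          | [] => []
          | h :: t => h :: adjRev t_max h t) := by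
  have main : ∀ (n : Nat) (r : List Int), r.length ≤ n → lessLen < r.length →
      loopR t_max lessLen r =
        (match trimR lessLen r with
          | [] => []
          | h :: t => h :: adjRev t_max h t) := by
    intro n
    induction n with
    | zero => intro r hn hl; omega
    | succ n ih =>
      intro r hn hl
      match r with
      | [h0] =>
        -- lessLen = 0, single element: loop breaks immediately
        have hl0 : lessLen = 0 := by
          simp only [List.length_cons, List.length_nil] at hl; omega
        rw [loopR]
        simp [hl0, trimR, adjRev]
      | h0 :: x :: t =>
        rw [loopR]
        have hcond : lessLen < (h0 :: x :: t).length := hl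
        rw [if_pos hcond, if_pos (by simp)]
        simp only [popR]
        have hlast' : (h0 :: x :: t).length = t.length + 2 := by simp
        by_cases hlast : t.length + 2 = lessLen + 1
        · -- last iteration: recursive call returns immediately
          have hll1 : 1 ≤ lessLen := by omega
          rw [loopR]
          rw [if_neg (by simp [adjRev_length]; omega)]
          have : trimR lessLen (h0 :: x :: t) = h0 :: t := by
            simp only [trimR]
            have h1 : (x :: t).length - (max lessLen 1 - 1) = 1 := by
              simp; omega
            rw [h1]
            simp
          rw [this]
        · -- more iterations remain
          have hlt : lessLen < t.length + 1 := by simp at hl; omega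
          have hrec := ih (h0 :: adjRev t_max h0 t)
            (by simp [adjRev_length]; simp at hn; omega)
            (by simp [adjRev_length]; omega)
          rw [hrec]
          have hk : max lessLen 1 - 1 ≤ t.length := by omega
          -- trimR of the adjusted list, then adjust again = trim then adjust once
          simp only [trimR, adjRev_length]
          have := adjRev_drop_adjRev t_max ht t (t.length - (max lessLen 1 - 1)) h0 h0 le_rfl
          rw [this]
          -- and trimR lessLen (h0::x::t) drops x as well
          rw [show (x :: t).length - (max lessLen 1 - 1) = (t.length - (max lessLen 1 - 1)) + 1 from by
                simp only [List.length_cons]; omega,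
              List.drop_succ_cons]
  intro r hl
  exact main r.length r le_rfl hl

-- B's kept list, reversed, is trimR of the reversed list
theorem kept_reverse_eq_trimR (m : List Int) (lessLen : Nat) (hm : lessLen < m.length) :
    (m.take (max lessLen 1 - 1) ++ m.drop (m.length - 1)).reverse = trimR lessLen m.reverse := by
  rcases List.eq_nil_or_concat m with rfl | ⟨ys, z, rfl⟩
  · simp at hm
  · rw [List.concat_eq_append] at hm ⊢
    have hk : max lessLen 1 - 1 ≤ ys.length := by simp at hm; omega
    have hlen : (ys ++ [z]).length - 1 = ys.length := by simp
    rw [hlen, List.take_append_of_le_length hk, List.drop_left, List.reverse_append,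
        List.reverse_take]
    have hrev : (ys ++ [z]).reverse = z :: ys.reverse := by simp
    rw [hrev]
    simp [trimR]

theorem loopR_reverse_eq_alt_core (t_max : Int) (ht : 0 ≤ t_max) (lessLen : Nat)
    (m : List Int) (hm : lessLen < m.length) :
    (loopR t_max lessLen m.reverse).reverse =
      (match (m.take (max lessLen 1 - 1) ++ m.drop (m.length - 1)).reverse with
        | [] => []
        | h :: t => (h :: adjRev t_max h t).reverse) := by
  rw [kept_reverse_eq_trimR m lessLen hm]
  rw [loopR_eq_adj_trimR t_max ht lessLen m.reverse (by simpa using hm)]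
  cases htr : trimR lessLen m.reverse with
  | nil => simp
  | cons h t => simp

-- ===== VERDICT (by name: the statement is the Claim_ definition above) =====
theorem balance_timetable_spec : Claim_equal_balance_timetable := by
  intro up down se t_max _ hpre
  unfold Spec_balance_timetable balance_timetable balance_timetable_alt
  have hu : (PySem.List.sorted up (fun x => x) false).length = up.length := PySem.List.length_sorted ..
  have hd : (PySem.List.sorted down (fun x => x) false).length = down.length := PySem.List.length_sorted ..
  by_cases heq : up.length = down.length
  · simp [heq, hu, hd]
  · simp only [hu, hd, if_neg heq]
    by_cases hgt : up.length > down.length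
    · simp only [if_pos hgt]
      rw [loopR_reverse_eq_alt_core t_max hpre _ _ (by rw [hu, hd]; omega)]
    · simp only [if_neg hgt]
      rw [loopR_reverse_eq_alt_core t_max hpre _ _ (by rw [hu, hd]; omega)]
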